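-- pv_equiv track=rewrite | github.com/freshmakerzhao/AutoTestTool | 相关资料/crc_debug(1).py | reflect_bits
-- ===== SOURCE A (Python) =====
-- def reflect_bits(data, num_bits):
--     reflected = 0
--     for i in range(num_bits):
--         if data & (1 << i):
--             reflected |= 1 << (num_bits - 1 - i)
--     reflected = bin(reflected)[2:]
--     while len(reflected) != num_bits:
--         reflected = '0' + reflected
--     return reflected
-- ===== SOURCE B (Python) =====
-- def reflect_bits(data, num_bits):
--     # Build the reflected bit string directly: output index j carries bit j of data.
--     return ''.join('1' if (data >> j) & 1 else '0' for j in range(num_bits))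
-- ===== Notes on version B (the rewrite author's own statement) =====
-- stated objective: simpler
-- what changed: B drops A's reflected-integer accumulator, bin() conversion and zero-padding while-loop, and builds the output string directly in one pass (output index j is bit j of data).
import Mathlib
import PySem

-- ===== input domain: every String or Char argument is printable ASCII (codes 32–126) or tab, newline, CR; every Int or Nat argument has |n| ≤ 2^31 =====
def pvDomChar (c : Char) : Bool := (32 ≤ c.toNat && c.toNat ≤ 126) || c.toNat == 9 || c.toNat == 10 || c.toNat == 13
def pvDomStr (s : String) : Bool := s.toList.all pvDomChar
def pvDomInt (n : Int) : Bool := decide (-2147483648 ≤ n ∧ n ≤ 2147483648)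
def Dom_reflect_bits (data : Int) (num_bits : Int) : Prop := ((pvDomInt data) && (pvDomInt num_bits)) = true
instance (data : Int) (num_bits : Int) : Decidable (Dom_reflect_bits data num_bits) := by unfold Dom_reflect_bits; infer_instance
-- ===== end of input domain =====

-- B builds the output string directly in one pass (output index j is bit j of data),
-- dropping A's reflected-integer accumulator, bin() conversion and zero-padding while-loop.

-- ===== PORT A =====
-- the `while len(reflected) != num_bits: reflected = '0' + reflected` loop; the fuel
-- (num_bits - len).toNat is exactly the number of iterations whenever the Python loop terminates
def pvPadWhile (num_bits : Int) : Nat → List Char → List Char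
  | 0, s => s
  | f+1, s => if (s.length : Int) ≠ num_bits then pvPadWhile num_bits f ('0' :: s) else s

def reflect_bits (data : Int) (num_bits : Int) : String :=
  let reflected : Int := (PySem.List.pyRange 0 num_bits).foldl
    (fun reflected i =>
      -- `data & (1 << i)` truthiness; `1 << i` as `1 <<< i.toNat` is exact since i ≥ 0 in the range
      if PySem.Int.band data (1 <<< i.toNat) ≠ 0 then
        PySem.Int.bor reflected (1 <<< (num_bits - 1 - i).toNat)
      else reflected) 0
  let s : List Char := PySem.List.slice (PySem.Int.pyBin reflected).toList (some 2) none
  String.ofList (pvPadWhile num_bits (num_bits - (s.length : Int)).toNat s)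

-- ===== PORT B =====
def reflect_bits_alt (data : Int) (num_bits : Int) : String :=
  -- `'1' if (data >> j) & 1 else '0'`; `data >> j` as `data >>> j.toNat` is exact since j ≥ 0
  String.ofList ((PySem.List.pyRange 0 num_bits).map
    (fun j => if PySem.Int.band (data >>> j.toNat) 1 ≠ 0 then '1' else '0'))

-- ===== PRECONDITION & SPEC =====
-- Pre_ excludes num_bits ≤ 0, where A's zero-padding while-loop never terminates (bin gives a
-- non-empty string whose length only grows, so it can never equal num_bits ≤ 0).
def Pre_reflect_bits (data : Int) (num_bits : Int) : Prop := 1 ≤ num_bits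
instance (data : Int) (num_bits : Int) : Decidable (Pre_reflect_bits data num_bits) := by unfold Pre_reflect_bits; infer_instance
def pvWitness_reflect_bits : Int × Int := (5, 4)

def Spec_reflect_bits (data : Int) (num_bits : Int) (out : String) : Prop := out = reflect_bits_alt data num_bits
instance (data : Int) (num_bits : Int) (out : String) : Decidable (Spec_reflect_bits data num_bits out) := by unfold Spec_reflect_bits; infer_instance

-- ===== CLAIM (what is proved, stated in full; the proofs are below) =====
def Claim_equal_reflect_bits : Prop := ∀ (data : Int) (num_bits : Int), Dom_reflect_bits data num_bits → Pre_reflect_bits data num_bits → Spec_reflect_bits data num_bits (reflect_bits data num_bits)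

-- ===== LEMMAS AND PROOFS =====

-- x.testBit i  as an arithmetic condition
theorem pv_testBit_mod2 (x i : Nat) : x.testBit i = decide ((x >>> i) % 2 = 1) := by
  simp [Nat.testBit]

-- `data & (1 << m) != 0`  is  bit m of data (Python two's-complement &)
theorem pv_condA (d : Int) (m : Nat) :
    (PySem.Int.band d (((1 <<< m : Nat)) : Int) ≠ 0) ↔ d.testBit m = true := by
  have h1 : (((1 <<< m : Nat)) : Int) = ((2^m : Nat) : Int) := by
    rw [Nat.one_shiftLeft]
  rcases d with a | a
  · rw [h1, show (Int.ofNat a) = ((a : Nat) : Int) from rfl, PySem.Int.band_natCast,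
       show (((a : Nat) : Int)).testBit m = a.testBit m from rfl]
    cases ht : a.testBit m <;>
      simp [Nat.and_two_pow, ht]
  · have e1 : (-(Int.negSucc a) - 1) = (a : Int) := by rw [Int.negSucc_eq]; ring
    have hneg : ¬ (0 ≤ Int.negSucc a) := by rw [Int.negSucc_eq]; omega
    have hb : PySem.Int.band (Int.negSucc a) ((2^m : Nat) : Int)
        = ((2^m - (2^m &&& a) : Nat) : Int) := by
      rw [PySem.Int.band, if_neg hneg, if_pos (Int.natCast_nonneg _), e1,
        Int.toNat_natCast, Int.toNat_natCast]
    rw [h1, hb, show (Int.negSucc a).testBit m = !a.testBit m from rfl]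
    cases ht : a.testBit m <;>
      simp [Nat.two_pow_and, ht]

-- `(d >> m) & 1 != 0`  is  bit m of d
theorem pv_condB (d : Int) (m : Nat) :
    (PySem.Int.band (d >>> ((m : Nat) : Int)) 1 ≠ 0) ↔ d.testBit m = true := by
  rw [PySem.Int.band_one]
  simp only [ne_eq]
  rw [PySem.Int.mod_eq_zero_iff_dvd]
  rcases d with a | a
  · rw [show (Int.ofNat a) = ((a : Nat) : Int) from rfl, Int.shiftRight_natCast,
      show (((a : Nat) : Int)).testBit m = a.testBit m from rfl, pv_testBit_mod2]
    simp only [decide_eq_true_eq]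
    omega
  · rw [show (Int.negSucc a).testBit m = !a.testBit m from rfl,
      Int.shiftRight_negSucc, Int.negSucc_eq, pv_testBit_mod2]
    simp only [Bool.not_eq_true', decide_eq_false_iff_not]
    omega

-- bin(n)[2:] without zero-padding, recursively
def pvBin (n : Nat) : List Char :=
  if n < 2 then [Nat.digitChar n]
  else pvBin (n / 2) ++ [Nat.digitChar (n % 2)]
decreasing_by exact Nat.div_lt_self (by omega) (by omega)

theorem pv_toDigitsCore_eq (f : Nat) : ∀ (n : Nat) (l : List Char), n < 2^f →
    Nat.toDigitsCore 2 (f+1) n l = pvBin n ++ l := by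
  induction f with
  | zero =>
    intro n l h
    have hn : n = 0 := by simpa using h
    subst hn
    rw [show Nat.toDigitsCore 2 (0+1) 0 l = Nat.digitChar (0 % 2) :: l from rfl, pvBin]
    norm_num [Nat.digitChar]
  | succ f ih =>
    intro n l h
    rw [show Nat.toDigitsCore 2 (f+1+1) n l
        = if n / 2 = 0 then Nat.digitChar (n % 2) :: l
          else Nat.toDigitsCore 2 (f+1) (n / 2) (Nat.digitChar (n % 2) :: l) from rfl]
    by_cases h0 : n / 2 = 0
    · have hn2 : n < 2 := by omega
      rw [if_pos h0, pvBin, if_pos hn2, Nat.mod_eq_of_lt hn2]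
      simp
    · rw [if_neg h0]
      have hlt : n / 2 < 2^f := by
        rw [pow_succ] at h
        omega
      rw [ih (n/2) (Nat.digitChar (n % 2) :: l) hlt]
      conv_rhs => rw [pvBin]
      rw [if_neg (show ¬ n < 2 by omega)]
      simp

theorem pv_toDigits_eq (n : Nat) : Nat.toDigits 2 n = pvBin n := by
  have h := pv_toDigitsCore_eq n n [] Nat.lt_two_pow_self
  simpa [Nat.toDigits] using h

theorem pv_pvBin_len (m : Nat) : ∀ n : Nat, n < 2^m → 1 ≤ m → (pvBin n).length ≤ m := by
  induction m with
  | zero => intro n _ h1; omega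
  | succ m ih =>
    intro n h _
    by_cases h2 : n < 2
    · rw [pvBin, if_pos h2]; simp
    · rw [pvBin, if_neg h2]
      have h1m : 1 ≤ m := by
        rcases Nat.eq_zero_or_pos m with hm | hm
        · subst hm; norm_num at h; omega
        · omega
      have hrec := ih (n/2) (by rw [pow_succ] at h; omega) h1m
      simp only [List.length_append, List.length_singleton]
      omega

-- the m low-order bits of x, big-endian, as characters
def pvBE : Nat → Nat → List Char
  | 0, _ => []
  | m+1, x => pvBE m (x / 2) ++ [Nat.digitChar (x % 2)]

theorem pv_pvBE_len (m : Nat) : ∀ x, (pvBE m x).length = m := by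
  induction m with
  | zero => intro x; rfl
  | succ m ih => intro x; simp [pvBE, ih]

theorem pv_pvBE_zero (m : Nat) : pvBE m 0 = List.replicate m '0' := by
  induction m with
  | zero => rfl
  | succ m ih => simp [pvBE, ih, ← List.replicate_succ', Nat.digitChar]

theorem pv_pad_pvBin (m : Nat) : ∀ x, 1 ≤ m → x < 2^m →
    List.replicate (m - (pvBin x).length) '0' ++ pvBin x = pvBE m x := by
  induction m with
  | zero => intro x h _; omega
  | succ m ih =>
    intro x h1 hx
    by_cases h2 : x < 2
    · rw [pvBin, if_pos h2]
      rw [pvBE, Nat.div_eq_of_lt h2, pv_pvBE_zero, Nat.mod_eq_of_lt h2]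
      norm_num
    · rw [pvBin, if_neg h2]
      rw [pvBE]
      have h1m : 1 ≤ m := by
        rcases Nat.eq_zero_or_pos m with hm | hm
        · subst hm; norm_num at hx; omega
        · omega
      have hx2 : x / 2 < 2^m := by
        rw [pow_succ] at hx
        omega
      have hlen := pv_pvBin_len m (x/2) hx2 h1m
      rw [← ih (x/2) h1m hx2, List.length_append, List.length_singleton,
        show m + 1 - ((pvBin (x/2)).length + 1) = m - (pvBin (x/2)).length from by omega,
        ← List.append_assoc]

theorem pv_pvBE_getElem (m : Nat) : ∀ (x j : Nat) (h : j < (pvBE m x).length),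
    (pvBE m x)[j] = if x.testBit (m-1-j) then '1' else '0' := by
  induction m with
  | zero => intro x j h; simp [pvBE] at h
  | succ m ih =>
    intro x j h
    simp only [pvBE]
    rcases Nat.lt_or_ge j m with hj | hj
    · rw [List.getElem_append_left (by rw [pv_pvBE_len]; exact hj)]
      rw [ih (x/2) j (by rw [pv_pvBE_len]; exact hj)]
      have e : m + 1 - 1 - j = (m - 1 - j) + 1 := by omega
      rw [e, Nat.testBit_succ]
    · have hlen : j < (pvBE m (x/2) ++ [Nat.digitChar (x % 2)]).length := by
        simp only [pvBE] at h; exact h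
      have hj' : j = m := by
        simp only [List.length_append, pv_pvBE_len, List.length_singleton] at hlen
        omega
      rw [List.getElem_append_right (by rw [pv_pvBE_len]; omega)]
      rw [List.getElem_singleton]
      have e : m + 1 - 1 - j = 0 := by omega
      rw [e, Nat.testBit_zero]
      rcases Nat.mod_two_eq_zero_or_one x with hx | hx <;> simp [hx, Nat.digitChar]

theorem pv_padWhile_eq (nb : Int) (f : Nat) : ∀ s : List Char, (s.length : Int) + f = nb →
    pvPadWhile nb f s = List.replicate f '0' ++ s := by
  induction f with
  | zero => intro s h; simp [pvPadWhile]
  | succ f ih =>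
    intro s h
    simp only [pvPadWhile]
    rw [if_pos (by push_cast at h ⊢; omega)]
    rw [ih ('0'::s) (by simp at h ⊢; omega)]
    rw [show ('0'::s : List Char) = ['0'] ++ s from rfl, ← List.append_assoc,
      ← List.replicate_succ']

-- the reflected-integer loop of A: its value is the Nat whose bit k (k < n) is bit (n-1-k) of d
theorem pv_loop_spec (d : Int) (n : Nat) : ∀ m, m ≤ n →
    ∃ r : Nat,
      ((List.range m).map (Nat.cast : Nat → Int)).foldl
        (fun reflected i =>
          if PySem.Int.band d (1 <<< i.toNat) ≠ 0 then
            PySem.Int.bor reflected (1 <<< (((n:Int)) - 1 - i).toNat)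
          else reflected) 0 = (r : Int)
      ∧ r < 2^n
      ∧ ∀ k, r.testBit k = true ↔ (k < n ∧ n - m ≤ k ∧ d.testBit (n-1-k) = true) := by
  intro m
  induction m with
  | zero =>
    intro _
    refine ⟨0, by simp, Nat.two_pow_pos n, fun k => ?_⟩
    simp only [Nat.zero_testBit, Bool.false_eq_true, false_iff]
    rintro ⟨h1, h2, -⟩
    omega
  | succ m ih =>
    intro hm1
    obtain ⟨r, hfold, hlt, hbit⟩ := ih (by omega)
    rw [List.range_succ, List.map_append, List.foldl_append, hfold]
    simp only [List.map_cons, List.map_nil, List.foldl_cons, List.foldl_nil]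
    have htn : ((m:Int)).toNat = m := Int.toNat_natCast m
    have hidx : (((n:Int)) - 1 - (m:Int)).toNat = n - 1 - m := by omega
    rw [htn, hidx]
    by_cases hc : PySem.Int.band d (((1 <<< m : Nat)) : Int) ≠ 0
    · rw [if_pos hc]
      have hdm : d.testBit m = true := (pv_condA d m).mp hc
      have hsh : (((1 <<< (n-1-m) : Nat)) : Int) = ((2^(n-1-m) : Nat) : Int) := by
        rw [Nat.one_shiftLeft]
      rw [hsh, PySem.Int.bor_natCast]
      refine ⟨r ||| 2^(n-1-m), rfl,
        Nat.or_lt_two_pow hlt (Nat.pow_lt_pow_right one_lt_two (by omega)), fun k => ?_⟩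
      rw [Nat.testBit_or, Bool.or_eq_true, hbit k, Nat.testBit_two_pow,
        decide_eq_true_eq]
      constructor
      · rintro (⟨h1, h2, h3⟩ | he)
        · exact ⟨h1, by omega, h3⟩
        · refine ⟨by omega, by omega, ?_⟩
          rw [show n - 1 - k = m from by omega]
          exact hdm
      · rintro ⟨h1, h2, h3⟩
        by_cases hk : k = n - 1 - m
        · right; omega
        · exact Or.inl ⟨h1, by omega, h3⟩
    · rw [if_neg hc]
      have hdm : d.testBit m = false := by
        cases hcb : d.testBit m
        · rfl
        · exact absurd ((pv_condA d m).mpr hcb) hc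
      refine ⟨r, rfl, hlt, fun k => ?_⟩
      rw [hbit k]
      constructor
      · rintro ⟨h1, h2, h3⟩
        exact ⟨h1, by omega, h3⟩
      · rintro ⟨h1, h2, h3⟩
        refine ⟨h1, ?_, h3⟩
        by_cases hk : k = n - 1 - m
        · subst hk
          rw [show n - 1 - (n - 1 - m) = m from by omega, hdm] at h3
          cases h3
        · omega

-- ===== VERDICT (by name: the statement is the Claim_ definition above) =====
theorem reflect_bits_spec : Claim_equal_reflect_bits := by
  intro data num_bits _ hpre
  unfold Pre_reflect_bits at hpre
  unfold Spec_reflect_bits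
  simp only [reflect_bits, reflect_bits_alt]
  set n : Nat := num_bits.toNat with hn
  have hnb : (n : Int) = num_bits := Int.toNat_of_nonneg (by omega)
  have hn1 : 1 ≤ n := by omega
  rw [← hnb, PySem.List.pyRange_zero_natCast]
  obtain ⟨r, hfold, hrlt, hrbit⟩ := pv_loop_spec data n n le_rfl
  rw [hfold]
  have htl : (PySem.Int.pyBin (r:Int)).toList = '0' :: 'b' :: Nat.toDigits 2 r := by
    rw [PySem.Int.toList_pyBin]
    simp [PySem.Int.toBinChars0b]
  rw [htl]
  rw [show PySem.List.slice ('0' :: 'b' :: Nat.toDigits 2 r) (some 2) none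
      = Nat.toDigits 2 r from by
    simpa using PySem.List.slice_from_natCast ('0' :: 'b' :: Nat.toDigits 2 r) 2]
  rw [pv_toDigits_eq]
  have hL := pv_pvBin_len n r hrlt hn1
  rw [show ((n:Int) - ((pvBin r).length : Int)).toNat = n - (pvBin r).length from by omega]
  rw [pv_padWhile_eq (↑n) (n - (pvBin r).length) (pvBin r) (by omega)]
  rw [pv_pad_pvBin n r hn1 hrlt]
  congr 1
  refine List.ext_getElem ?_ ?_
  · simp [pv_pvBE_len n]
  · intro j h1 h2
    have hjn : j < n := by rw [pv_pvBE_len n] at h1; exact h1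
    rw [pv_pvBE_getElem n r j h1]
    simp only [List.getElem_map, List.getElem_range, Int.toNat_natCast]
    have e : n - 1 - (n - 1 - j) = j := by omega
    have hb := hrbit (n - 1 - j)
    rw [e] at hb
    by_cases hd : data.testBit j = true
    · rw [if_pos (hb.mpr ⟨by omega, by omega, hd⟩), if_pos ((pv_condB data j).mpr hd)]
    · rw [if_neg (fun hh => hd (hb.mp hh).2.2), if_neg (fun hh => hd ((pv_condB data j).mp hh))]
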